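-- pv_equiv track=rewrite | github.com/tingtingshi123/external-seed2021-cancer-and-zhihuishuili-master | utils/Fileoputil.py | split_files
-- ===== SOURCE A (Python) =====
-- def split_files(filenames, single_size):
--     res = []
--     files_num = len(filenames)
--     if files_num > single_size:
--         remainder = files_num % single_size
--         if remainder != 0:
--             new_file_num = int(files_num / single_size) + 1
--         else:
--             new_file_num = int(files_num / single_size)
--         for i in range(1, new_file_num):
--             start = (i - 1) * single_size
--             end = i * single_size
--             res.append({"start": start, "end": end})
--         start = (new_file_num - 1) * single_size
--         end = files_num
--         res.append({"start": start, "end": end})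
--     else:
--         start = 0
--         end = files_num
--         res.append({"start": start, "end": end})
--     return res
-- ===== SOURCE B (Python) =====
-- def split_files(filenames, single_size):
--     def go(rest, start):
--         chunk = rest[:single_size]
--         tail = rest[single_size:]
--         cur = {"start": start, "end": start + len(chunk)}
--         if not tail:
--             return [cur]
--         return [cur] + go(tail, start + len(chunk))
--     return go(filenames, 0)
-- ===== Notes on version B (the rewrite author's own statement) =====
-- stated objective: alternative
-- what changed: Replaces A's arithmetic chunk-count computation (remainder test, new_file_num, index loop emitting i*single_size bounds plus a separate final chunk and a small-case branch) by structural recursion on the list itself: peel off the first single_size filenames with slicing, emit {start, start+len(chunk)}, and recurse on the tail with an advanced offset.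
-- outside the precondition, e.g. on split_files(['a', 'b'], -1): A returns [{'start': 3, 'end': 2}], B raises RecursionError; on split_files(['a', 'b'], 0): A raises ZeroDivisionError, B raises RecursionError
import Mathlib
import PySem

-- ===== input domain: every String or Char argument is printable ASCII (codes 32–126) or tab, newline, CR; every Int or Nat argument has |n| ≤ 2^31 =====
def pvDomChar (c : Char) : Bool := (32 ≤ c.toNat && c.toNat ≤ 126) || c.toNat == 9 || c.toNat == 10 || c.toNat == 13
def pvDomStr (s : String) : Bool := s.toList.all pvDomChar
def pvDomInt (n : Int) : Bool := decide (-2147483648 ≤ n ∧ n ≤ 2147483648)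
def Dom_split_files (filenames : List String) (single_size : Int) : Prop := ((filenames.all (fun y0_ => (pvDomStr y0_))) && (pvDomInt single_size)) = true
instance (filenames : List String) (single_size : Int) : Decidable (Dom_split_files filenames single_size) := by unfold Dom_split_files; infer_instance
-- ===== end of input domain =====

-- B replaces A's arithmetic chunk-count bookkeeping by structural recursion on the
-- filename list itself (slice off single_size names, emit a chunk, recurse on the tail);
-- objective: alternative decomposition, same cost per chunk.


-- ===== PORT A =====
-- Note: Python's `int(files_num / single_size)` (true division, then truncation toward zero)
-- is ported as Int.tdiv (truncating division); exact whenever the float quotient is exact,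
-- in particular for every list length reachable here.
def split_files (filenames : List String) (single_size : Int) : List (List (String × Int)) :=
  let files_num : Int := (filenames.length : Int)
  if files_num > single_size then
    let remainder := PySem.Int.mod files_num single_size
    let new_file_num : Int :=
      if remainder ≠ 0 then Int.tdiv files_num single_size + 1
      else Int.tdiv files_num single_size
    let res := (PySem.List.pyRange 1 new_file_num 1).foldl
      (fun res i => res ++ [[("start", (i - 1) * single_size), ("end", i * single_size)]])
      ([] : List (List (String × Int)))
    res ++ [[("start", (new_file_num - 1) * single_size), ("end", files_num)]]
  else
    [[("start", (0 : Int)), ("end", files_num)]]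

-- ===== PORT B =====
-- `go(rest, start)` of Source B; the Nat fuel only makes the recursion total in Lean
-- (the Python recursion terminates on every input Pre_ admits, where fuel suffices).
def split_files_go (fuel : Nat) (rest : List String) (single_size : Int) (start : Int) :
    List (List (String × Int)) :=
  match fuel with
  | 0 => []
  | fuel + 1 =>
    let chunk := PySem.List.slice rest none (some single_size)
    let tail := PySem.List.slice rest (some single_size) none
    let cur : List (String × Int) := [("start", start), ("end", start + (chunk.length : Int))]
    if tail = [] then [cur]
    else cur :: split_files_go fuel tail single_size (start + (chunk.length : Int))

def split_files_alt (filenames : List String) (single_size : Int) : List (List (String × Int)) :=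
  split_files_go (filenames.length + 1) filenames single_size 0

-- ===== PRECONDITION & SPEC =====
-- Pre_ excludes single_size ≤ 0, outside the function's natural domain: at 0 both programs
-- raise (A: ZeroDivisionError, B: RecursionError) on nonempty input, and for negative sizes
-- A's leftover arithmetic returns an accidental reversed range while B's recursion never
-- shrinks its list and raises RecursionError.
def Pre_split_files (filenames : List String) (single_size : Int) : Prop := 1 ≤ single_size
instance (filenames : List String) (single_size : Int) : Decidable (Pre_split_files filenames single_size) := by unfold Pre_split_files; infer_instance
def pvWitness_split_files : List String × Int := (["a", "b", "c"], 2)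

def Spec_split_files (filenames : List String) (single_size : Int) (out : List (List (String × Int))) : Prop := out = split_files_alt filenames single_size
instance (filenames : List String) (single_size : Int) (out : List (List (String × Int))) : Decidable (Spec_split_files filenames single_size out) := by unfold Spec_split_files; infer_instance

-- ===== CLAIM (what is proved, stated in full; the proofs are below) =====
def Claim_equal_split_files : Prop := ∀ (filenames : List String) (single_size : Int), Dom_split_files filenames single_size → Pre_split_files filenames single_size → Spec_split_files filenames single_size (split_files filenames single_size)

-- ===== LEMMAS AND PROOFS =====

-- common intermediate form: one chunk per stride position
def strideForm (filenames : List String) (s : Int) : List (List (String × Int)) :=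
  let n : Int := (filenames.length : Int)
  if n = 0 then [[("start", 0), ("end", 0)]]
  else
    (PySem.List.pyRange 0 n s).map
      (fun start => [("start", start), ("end", min (start + s) n)])

-- foldl that only appends one element per step is a map
theorem foldl_append_map {α β : Type} (l : List α) (f : α → β) (init : List β) :
    l.foldl (fun r i => r ++ [f i]) init = init ++ l.map f := by
  induction l generalizing init with
  | nil => simp
  | cons a t ih => simp [List.foldl_cons, ih, List.append_assoc]

-- ceiling division characterisation: (n + s - 1) / s for 1 ≤ s, written via n / s and n % s
theorem ceil_div_eq (n s : Int) (hs : 1 ≤ s) :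
    (n + s - 1) / s = if n % s = 0 then n / s else n / s + 1 := by
  have hs0 : (0 : Int) < s := by omega
  have hq := Int.mul_ediv_add_emod n s
  have hr0 : 0 ≤ n % s := Int.emod_nonneg n (by omega)
  have hrs : n % s < s := Int.emod_lt_of_pos n hs0
  by_cases h : n % s = 0
  · simp only [h, if_true]
    have : ((s - 1) + s * (n / s) = n + s - 1) ∧ 0 ≤ (s - 1) ∧ s - 1 < s := by omega
    exact ((Int.ediv_emod_unique hs0).mpr ⟨this.1, this.2⟩).1
  · simp only [h, if_false]
    have : ((n % s - 1) + s * (n / s + 1) = n + s - 1) ∧ 0 ≤ n % s - 1 ∧ n % s - 1 < s := by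
      constructor
      · ring_nf; omega
      · omega
    exact ((Int.ediv_emod_unique hs0).mpr ⟨this.1, this.2.1, this.2.2⟩).1

-- A equals the stride form (for positive single_size)
theorem A_eq_stride (filenames : List String) (s : Int) (hs : 1 ≤ s) :
    split_files filenames s = strideForm filenames s := by
  unfold split_files strideForm
  simp only []
  set n : Int := (filenames.length : Int) with hn
  have hn0 : 0 ≤ n := by positivity
  have hs0 : (0 : Int) < s := hs
  have hfd : Int.tdiv n s = n / s := by
    rw [Int.tdiv_eq_ediv_of_nonneg hn0]
  have hfm : PySem.Int.mod n s = n % s := by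
    simp [PySem.Int.mod, Int.fmod_eq_emod, hs0.le]
  have hq := Int.mul_ediv_add_emod n s
  have hr0 : 0 ≤ n % s := Int.emod_nonneg n (by omega)
  have hrs : n % s < s := Int.emod_lt_of_pos n hs0
  by_cases hgt : n > s
  · -- n > s ≥ 1; both sides produce ceil(n/s) chunks
    rw [if_pos hgt, if_neg (by omega : ¬ n = 0)]
    rw [hfd, hfm]
    set N : Int := if n % s ≠ 0 then n / s + 1 else n / s with hN
    have hNceil : (n + s - 1) / s = N := by
      rw [ceil_div_eq n s hs, hN]
      by_cases h : n % s = 0 <;> simp [h]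
    have hq1 : 1 ≤ n / s := by
      have := Int.le_ediv_iff_mul_le hs0 (a := 1) (b := n)
      omega
    have hN1 : 1 ≤ N := by rw [hN]; split_ifs <;> omega
    -- A side: fold to map
    rw [PySem.List.pyRange_one, foldl_append_map, List.nil_append, List.map_map]
    -- stride side
    rw [PySem.List.pyRange_of_pos 0 n hs0, if_pos (by omega : (0:Int) < n), List.map_map]
    simp only [Int.sub_zero, Int.zero_add] at *
    rw [hNceil]
    have hK : N.toNat = (N - 1).toNat + 1 := by omega
    rw [hK, List.range_succ, List.map_append]
    have hsN : n ≤ s * N := by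
      have hmul : s * (n / s) = n - n % s := by omega
      rw [hN]
      by_cases h : n % s = 0
      · simp only [h, ne_eq, not_true_eq_false, if_false]; omega
      · simp only [h, ne_eq, not_false_eq_true, if_true]; rw [mul_add]; omega
    congr 1
    · apply List.map_congr_left
      intro k hk
      have hk' : (k : Int) + 1 ≤ N - 1 := by
        have := List.mem_range.mp hk
        omega
      have hle : s * ((k : Int) + 1) ≤ n := by
        have h1 : (k : Int) + 1 ≤ n / s := by
          rw [hN] at hk'; split_ifs at hk' <;> omega
        have h2 : s * ((k : Int) + 1) ≤ s * (n / s) :=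
          mul_le_mul_of_nonneg_left h1 hs0.le
        omega
      simp only [Function.comp_apply]
      have hmin : min (s * (k : Int) + s) n = s * (k : Int) + s := by
        rw [min_eq_left]
        rw [mul_add, mul_one] at hle; omega
      rw [hmin]
      ring_nf
    · have hcast : (((N - 1).toNat : Int)) = N - 1 := by omega
      simp only [List.map_cons, List.map_nil, Function.comp_apply]
      rw [hcast]
      have hmin : min (s * (N - 1) + s) n = n := by
        rw [min_eq_right]; nlinarith
      rw [hmin]
      ring_nf
  · rw [if_neg hgt]
    by_cases h0 : n = 0
    · rw [if_pos h0, h0]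
    · rw [if_neg h0, PySem.List.pyRange_of_pos 0 n hs0, if_pos (by omega : (0:Int) < n)]
      have h1 : (n - 0 + s - 1) / s = 1 := by
        have h := (Int.ediv_emod_unique (a := n - 0 + s - 1) (r := n - 1) (q := 1) hs0).mpr
          ⟨by omega, by omega, by omega⟩
        exact h.1
      rw [h1]
      have hmin : min (0 + s * ((0:Nat) : Int) + s) n = n := by
        rw [min_eq_right]; omega
      simp only [Int.toNat_one, List.range_one, List.map_cons, List.map_nil]
      rw [hmin]
      norm_num

-- positive-step range: nil and cons induction forms
theorem pyRange_pos_eq_nil (a b s : Int) (hs : 0 < s) (hba : b ≤ a) :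
    PySem.List.pyRange a b s = [] := by
  rw [PySem.List.pyRange_of_pos a b hs, if_neg (by omega : ¬ a < b)]
  simp

theorem pyRange_pos_cons (a b s : Int) (hs : 0 < s) (hab : a < b) :
    PySem.List.pyRange a b s = a :: PySem.List.pyRange (a + s) b s := by
  rw [PySem.List.pyRange_of_pos a b hs, PySem.List.pyRange_of_pos (a + s) b hs,
    if_pos hab]
  have hK : (b - a + s - 1) / s = (b - a - 1) / s + 1 := by
    have he : b - a + s - 1 = b - a - 1 + 1 * s := by ring
    rw [he, Int.add_mul_ediv_right _ _ (by omega : s ≠ 0)]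
  by_cases h2 : a + s < b
  · rw [if_pos h2]
    have hKnat : ((b - a + s - 1) / s).toNat = ((b - (a + s) + s - 1) / s).toNat + 1 := by
      have hnn : 0 ≤ (b - (a + s) + s - 1) / s :=
        Int.ediv_nonneg (by omega) (by omega)
      have : b - (a + s) + s - 1 = b - a - 1 := by ring
      rw [this] at hnn ⊢
      omega
    rw [hKnat, List.range_succ_eq_map, List.map_cons, List.map_map]
    congr 1
    · ring_nf
    · apply List.map_congr_left
      intro k _
      simp only [Function.comp_apply, Nat.succ_eq_add_one]
      push_cast
      ring
  · rw [if_neg h2]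
    have hnn : 0 ≤ (b - a - 1) / s := Int.ediv_nonneg (by omega) (by omega)
    have hlt : (b - a - 1) / s < 1 := by
      have := Int.ediv_lt_iff_lt_mul (a := b - a - 1) (b := 1) hs
      rw [this]; omega
    have hK1 : ((b - a + s - 1) / s).toNat = 1 := by omega
    rw [hK1]
    simp

-- B's recursion equals the stride form on a shifted window
theorem go_eq_stride (s : Int) (hs : 1 ≤ s) :
    ∀ (fuel : Nat) (rest : List String) (start : Int), rest.length < fuel → rest ≠ [] →
      split_files_go fuel rest s start =
        (PySem.List.pyRange start (start + rest.length) s).map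
          (fun st => [("start", st), ("end", min (st + s) (start + rest.length))]) := by
  intro fuel
  induction fuel with
  | zero => intro rest start h _; omega
  | succ fuel ih =>
    intro rest start hfuel hne
    have hs0 : (0 : Int) < s := hs
    have hsn : ((s.toNat : Int)) = s := by omega
    have hlen0 : 0 < rest.length := List.length_pos_iff.mpr hne
    unfold split_files_go
    simp only []
    rw [PySem.List.slice_to rest (by omega : (0:Int) ≤ s), PySem.List.slice_from rest (by omega : (0:Int) ≤ s)]
    by_cases htail : rest.length ≤ s.toNat
    · -- last chunk: tail empty
      rw [if_pos (by simp [List.drop_eq_nil_iff]; omega)]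
      have hchunk : ((rest.take s.toNat).length : Int) = rest.length := by
        simp [List.length_take]; omega
      rw [hchunk]
      rw [pyRange_pos_cons start (start + rest.length) s hs0 (by omega),
        pyRange_pos_eq_nil (start + s) (start + rest.length) s hs0 (by omega)]
      simp only [List.map_cons, List.map_nil]
      have : min (start + s) (start + (rest.length : Int)) = start + rest.length := by omega
      rw [this]
    · -- middle chunk: recurse on the tail
      rw [if_neg (by simp [List.drop_eq_nil_iff]; omega)]
      have hchunk : ((rest.take s.toNat).length : Int) = s := by
        simp [List.length_take]; omega
      rw [hchunk]
      have hdroplen : ((rest.drop s.toNat).length : Int) = (rest.length : Int) - s := by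
        simp [List.length_drop]; omega
      rw [ih (rest.drop s.toNat) (start + s)
        (by simp [List.length_drop]; omega)
        (by simp [List.drop_eq_nil_iff]; omega)]
      rw [hdroplen]
      have hb : start + s + ((rest.length : Int) - s) = start + rest.length := by ring
      rw [hb]
      rw [pyRange_pos_cons start (start + rest.length) s hs0 (by omega)]
      simp only [List.map_cons]
      have : min (start + s) (start + (rest.length : Int)) = start + s := by omega
      rw [this]

theorem B_eq_stride (filenames : List String) (s : Int) (hs : 1 ≤ s) :
    split_files_alt filenames s = strideForm filenames s := by
  unfold split_files_alt strideForm
  simp only []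
  by_cases h0 : filenames = []
  · subst h0
    unfold split_files_go
    simp [PySem.List.slice_to ([] : List String) (by omega : (0:Int) ≤ s),
      PySem.List.slice_from ([] : List String) (by omega : (0:Int) ≤ s)]
  · rw [if_neg (by simpa using h0)]
    rw [go_eq_stride s hs (filenames.length + 1) filenames 0 (by omega) h0]
    simp

-- ===== VERDICT (by name: the statement is the Claim_ definition above) =====
theorem split_files_spec : Claim_equal_split_files := by
  intro filenames s _ hs
  unfold Spec_split_files
  rw [A_eq_stride filenames s hs, B_eq_stride filenames s hs]
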